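-- pv_equiv track=rewrite | github.com/RideMatch1/qubic-church | apps/web/scripts/validate_layer_formula.py | generate_layer_blocks
-- ===== SOURCE A (Python) =====
-- from typing import Dict, List, Set, Tuple
-- from collections import defaultdict
--
-- def generate_layer_blocks(layers: int = 3) -> Dict[int, List[Tuple[int, int, int]]]:
--     """
--     Generate all block heights from the layer formula.
--
--     Returns dict mapping block_height -> list of (layer, row, col) tuples
--     """
--     blocks = defaultdict(list)
--
--     for layer in range(layers):
--         for row in range(128):
--             for col in range(128):
--                 block = (layer * 16384) + (row * 128) + col
--                 blocks[block].append((layer, row, col))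
--
--     return dict(blocks)
-- ===== SOURCE B (Python) =====
-- def generate_layer_blocks(layers: int = 3):
--     """Build the block->coords dict in one flat comprehension, decoding (layer,row,col) from the index."""
--     return {i: [(i // 16384, (i // 128) % 128, i % 128)] for i in range(layers * 16384)}
-- ===== Notes on version B (the rewrite author's own statement) =====
-- stated objective: simpler
-- what changed: Replaces the three nested loops filling a defaultdict(list) by a single dict comprehension over the flat index range(layers*16384), recovering (layer, row, col) arithmetically as (i//16384, (i//128)%128, i%128).
import Mathlib
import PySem

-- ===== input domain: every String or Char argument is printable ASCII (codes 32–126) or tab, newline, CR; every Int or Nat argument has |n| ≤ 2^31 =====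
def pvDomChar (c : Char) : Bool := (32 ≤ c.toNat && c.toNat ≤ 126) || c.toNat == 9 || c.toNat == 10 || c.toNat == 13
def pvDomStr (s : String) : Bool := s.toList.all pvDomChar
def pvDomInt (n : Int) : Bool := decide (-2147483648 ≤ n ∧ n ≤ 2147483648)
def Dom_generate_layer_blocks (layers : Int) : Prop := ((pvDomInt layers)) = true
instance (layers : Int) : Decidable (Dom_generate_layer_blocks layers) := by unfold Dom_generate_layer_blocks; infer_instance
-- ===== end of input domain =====

-- B replaces A's three nested loops building a defaultdict by one flat dict comprehension over
-- range(layers*16384), decoding (layer, row, col) arithmetically from the index (objective: simpler).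

-- ===== PORT A =====
def generate_layer_blocks (layers : Int) : List (Int × List (Int × Int × Int)) :=
  ((PySem.List.pyRange 0 layers 1).foldl (fun blocks layer =>
    (PySem.List.pyRange 0 128 1).foldl (fun blocks row =>
      (PySem.List.pyRange 0 128 1).foldl (fun blocks col =>
        -- blocks[block].append((layer, row, col)) on a defaultdict(list)
        blocks.modify (layer * 16384 + row * 128 + col) [] (fun xs => xs ++ [(layer, row, col)]))
        blocks) blocks)
    (PySem.Dict.empty : PySem.Dict Int (List (Int × Int × Int)))).items

-- ===== PORT B =====
def generate_layer_blocks_alt (layers : Int) : List (Int × List (Int × Int × Int)) :=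
  -- {i: [(i // 16384, (i // 128) % 128, i % 128)] for i in range(layers * 16384)}
  ((PySem.List.pyRange 0 (layers * 16384) 1).foldl (fun d i =>
      d.insert i [(PySem.Int.floordiv i 16384,
                   PySem.Int.mod (PySem.Int.floordiv i 128) 128,
                   PySem.Int.mod i 128)])
    (PySem.Dict.empty : PySem.Dict Int (List (Int × Int × Int)))).items

-- ===== PRECONDITION & SPEC =====
def Spec_generate_layer_blocks (layers : Int) (out : List (Int × List (Int × Int × Int))) : Prop := out = generate_layer_blocks_alt layers
instance (layers : Int) (out : List (Int × List (Int × Int × Int))) : Decidable (Spec_generate_layer_blocks layers out) := by unfold Spec_generate_layer_blocks; infer_instance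

-- ===== CLAIM (what is proved, stated in full; the proofs are below) =====
def Claim_equal_generate_layer_blocks : Prop := ∀ (layers : Int), Dom_generate_layer_blocks layers → Spec_generate_layer_blocks layers (generate_layer_blocks layers)

-- ===== LEMMAS AND PROOFS =====

-- The innermost (col) loop of A appends one fresh entry per col.
lemma pv_col (layer row : Int) : ∀ (n : Nat) (c : Int), c + n = 128 →
    ∀ (d : PySem.Dict Int (List (Int × Int × Int))),
    (∀ p ∈ d.items, p.1 < layer * 16384 + row * 128 + c) →
    ((PySem.List.pyRange c 128 1).foldl (fun blocks col =>
        blocks.modify (layer * 16384 + row * 128 + col) [] (fun xs => xs ++ [(layer, row, col)])) d).items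
      = d.items ++ (PySem.List.pyRange c 128 1).map
          (fun col => (layer * 16384 + row * 128 + col, [(layer, row, col)])) := by
  intro n
  induction n with
  | zero =>
    intro c hc d hd
    rw [PySem.List.pyRange_one_eq_nil (by omega : (128:Int) ≤ c)]
    simp
  | succ n ih =>
    intro c hc d hd
    have hfresh : d.contains (layer * 16384 + row * 128 + c) = false := by
      rw [PySem.Dict.contains_eq_decide_mem_keys]
      simp only [decide_eq_false_iff_not, PySem.Dict.keys, List.mem_map, not_exists, not_and]
      intro p hp hpk
      have := hd p hp
      omega
    have hmi : d.modify (layer * 16384 + row * 128 + c) [] (fun xs => xs ++ [(layer, row, c)])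
        = d.insert (layer * 16384 + row * 128 + c)
            ((d.getD (layer * 16384 + row * 128 + c) []) ++ [(layer, row, c)]) := rfl
    have hstep : (d.modify (layer * 16384 + row * 128 + c) [] (fun xs => xs ++ [(layer, row, c)])).items
        = d.items ++ [(layer * 16384 + row * 128 + c, [(layer, row, c)])] := by
      rw [hmi, PySem.Dict.getD_of_not_contains d [] hfresh,
        PySem.Dict.items_insert_of_not_contains d _ hfresh]
      simp
    have hbound : ∀ p ∈ (d.modify (layer * 16384 + row * 128 + c) []
        (fun xs => xs ++ [(layer, row, c)])).items, p.1 < layer * 16384 + row * 128 + (c + 1) := by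
      intro p hp
      rw [hstep] at hp
      rcases List.mem_append.mp hp with h1 | h1
      · have := hd p h1; omega
      · simp only [List.mem_singleton] at h1
        subst h1
        dsimp only
        omega
    rw [PySem.List.pyRange_one_cons (by omega : c < (128:Int))]
    simp only [List.foldl_cons, List.map_cons]
    rw [ih (c + 1) (by omega) _ hbound, hstep]
    simp

-- The middle (row) loop of A.
lemma pv_row (layer : Int) : ∀ (n : Nat) (r : Int), r + n = 128 →
    ∀ (d : PySem.Dict Int (List (Int × Int × Int))),
    (∀ p ∈ d.items, p.1 < layer * 16384 + r * 128) →
    ((PySem.List.pyRange r 128 1).foldl (fun blocks row =>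
      (PySem.List.pyRange 0 128 1).foldl (fun blocks col =>
        blocks.modify (layer * 16384 + row * 128 + col) [] (fun xs => xs ++ [(layer, row, col)]))
        blocks) d).items
      = d.items ++ (PySem.List.pyRange r 128 1).flatMap (fun row =>
          (PySem.List.pyRange 0 128 1).map
            (fun col => (layer * 16384 + row * 128 + col, [(layer, row, col)]))) := by
  intro n
  induction n with
  | zero =>
    intro r hr d hd
    rw [PySem.List.pyRange_one_eq_nil (by omega : (128:Int) ≤ r)]
    simp
  | succ n ih =>
    intro r hr d hd
    have hcol := pv_col layer r 128 0 (by norm_num) d (by intro p hp; have := hd p hp; omega)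
    have hbound : ∀ p ∈ ((PySem.List.pyRange 0 128 1).foldl (fun blocks col =>
        blocks.modify (layer * 16384 + r * 128 + col) [] (fun xs => xs ++ [(layer, r, col)])) d).items,
        p.1 < layer * 16384 + (r + 1) * 128 := by
      intro p hp
      rw [hcol] at hp
      rcases List.mem_append.mp hp with h1 | h1
      · have := hd p h1; omega
      · simp only [List.mem_map] at h1
        obtain ⟨col, hcm, rfl⟩ := h1
        rw [PySem.List.mem_pyRange_one] at hcm
        dsimp only
        omega
    rw [PySem.List.pyRange_one_cons (by omega : r < (128:Int))]
    simp only [List.foldl_cons, List.flatMap_cons]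
    rw [ih (r + 1) (by omega) _ hbound, hcol]
    simp

-- The outer (layer) loop of A.
lemma pv_layer (layers : Int) : ∀ (n : Nat) (l : Int), l + n = layers →
    ∀ (d : PySem.Dict Int (List (Int × Int × Int))),
    (∀ p ∈ d.items, p.1 < l * 16384) →
    ((PySem.List.pyRange l layers 1).foldl (fun blocks layer =>
      (PySem.List.pyRange 0 128 1).foldl (fun blocks row =>
        (PySem.List.pyRange 0 128 1).foldl (fun blocks col =>
          blocks.modify (layer * 16384 + row * 128 + col) [] (fun xs => xs ++ [(layer, row, col)]))
          blocks) blocks) d).items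
      = d.items ++ (PySem.List.pyRange l layers 1).flatMap (fun layer =>
          (PySem.List.pyRange 0 128 1).flatMap (fun row =>
            (PySem.List.pyRange 0 128 1).map
              (fun col => (layer * 16384 + row * 128 + col, [(layer, row, col)])))) := by
  intro n
  induction n with
  | zero =>
    intro l hl d hd
    rw [PySem.List.pyRange_one_eq_nil (by omega : layers ≤ l)]
    simp
  | succ n ih =>
    intro l hl d hd
    have hrow := pv_row l 128 0 (by norm_num) d (by intro p hp; have := hd p hp; omega)
    have hbound : ∀ p ∈ ((PySem.List.pyRange 0 128 1).foldl (fun blocks row =>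
        (PySem.List.pyRange 0 128 1).foldl (fun blocks col =>
          blocks.modify (l * 16384 + row * 128 + col) [] (fun xs => xs ++ [(l, row, col)]))
          blocks) d).items, p.1 < (l + 1) * 16384 := by
      intro p hp
      rw [hrow] at hp
      rcases List.mem_append.mp hp with h1 | h1
      · have := hd p h1; omega
      · simp only [List.mem_flatMap, List.mem_map] at h1
        obtain ⟨row, hrm, col, hcm, rfl⟩ := h1
        rw [PySem.List.mem_pyRange_one] at hrm hcm
        dsimp only
        omega
    rw [PySem.List.pyRange_one_cons (by omega : l < layers)]
    simp only [List.foldl_cons, List.flatMap_cons]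
    rw [ih (l + 1) (by omega) _ hbound, hrow]
    simp

-- B's comprehension is a map over the flat range.
lemma pv_alt (layers : Int) :
    generate_layer_blocks_alt layers
      = (PySem.List.pyRange 0 (layers * 16384) 1).map (fun i =>
          (i, [(PySem.Int.floordiv i 16384,
                PySem.Int.mod (PySem.Int.floordiv i 128) 128,
                PySem.Int.mod i 128)])) := by
  have h1 : ∀ a ∈ PySem.List.pyRange 0 (layers * 16384) 1,
      (PySem.Dict.empty : PySem.Dict Int (List (Int × Int × Int))).contains ((fun i : Int => i) a) = false :=
    fun a _ => PySem.Dict.contains_empty a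
  have h2 : ((PySem.List.pyRange 0 (layers * 16384) 1).map (fun i : Int => i)).Nodup := by
    simpa using PySem.List.nodup_pyRange_one 0 (layers * 16384)
  have h3 := PySem.Dict.items_foldl_insert_fresh (PySem.List.pyRange 0 (layers * 16384) 1)
    (fun i : Int => i)
    (fun i : Int => [(PySem.Int.floordiv i 16384,
                      PySem.Int.mod (PySem.Int.floordiv i 128) 128,
                      PySem.Int.mod i 128)])
    PySem.Dict.empty h1 h2
  unfold generate_layer_blocks_alt
  simpa using h3

-- Shift a mapped range to start at 0.
lemma pv_shift {α : Type} (h : Int → α) (a b : Int) :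
    (PySem.List.pyRange a b 1).map h
      = (PySem.List.pyRange 0 (b - a) 1).map (fun j => h (a + j)) := by
  simp [PySem.List.pyRange_one, List.map_map, Function.comp_def]

-- Generic re-indexing: a flatMap over blocks of size k is a map over the flat range.
lemma pv_block {α : Type} (k : Int) (hk : 0 < k) (h : Int → α) : ∀ (n : Nat) (m : Int), m = (n : Int) →
    (PySem.List.pyRange 0 m 1).flatMap (fun a =>
        (PySem.List.pyRange 0 k 1).map (fun b => h (a * k + b)))
      = (PySem.List.pyRange 0 (m * k) 1).map h := by
  intro n
  induction n with
  | zero =>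
    intro m hm
    subst hm
    simp [PySem.List.pyRange_one_eq_nil]
  | succ n ih =>
    intro m hm
    subst hm
    rw [show ((n + 1 : Nat) : Int) = (n : Int) + 1 by push_cast; ring]
    rw [PySem.List.pyRange_one_succ_right (by positivity : (0:Int) ≤ (n : Int))]
    rw [List.flatMap_append, ih (n : Int) rfl]
    rw [PySem.List.pyRange_one_append 0 ((n : Int) * k) (((n : Int) + 1) * k)
      (by positivity) (by nlinarith)]
    rw [List.map_append]
    congr 1
    simp only [List.flatMap_cons, List.flatMap_nil, List.append_nil]
    rw [pv_shift h ((n : Int) * k) (((n : Int) + 1) * k),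
      show ((n : Int) + 1) * k - (n : Int) * k = k by ring]

-- The flattened triple loop of A equals B's flat map.
lemma pv_main (layers : Int) (hpos : 0 ≤ layers) :
    (PySem.List.pyRange 0 layers 1).flatMap (fun layer =>
        (PySem.List.pyRange 0 128 1).flatMap (fun row =>
          (PySem.List.pyRange 0 128 1).map
            (fun col => (layer * 16384 + row * 128 + col, [(layer, row, col)]))))
      = (PySem.List.pyRange 0 (layers * 16384) 1).map (fun i =>
          (i, [(PySem.Int.floordiv i 16384,
                PySem.Int.mod (PySem.Int.floordiv i 128) 128,
                PySem.Int.mod i 128)])) := by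
  have hG : (fun i : Int => (i, [(PySem.Int.floordiv i 16384,
        PySem.Int.mod (PySem.Int.floordiv i 128) 128, PySem.Int.mod i 128)]))
      = (fun i : Int => (i, [(i / 16384, (i / 128) % 128, i % 128)])) := by
    funext i
    rw [PySem.Int.floordiv_eq_ediv_of_pos (by norm_num : (0:Int) < 16384),
      PySem.Int.floordiv_eq_ediv_of_pos (by norm_num : (0:Int) < 128),
      PySem.Int.mod_eq_emod_of_pos (by norm_num : (0:Int) < 128),
      PySem.Int.mod_eq_emod_of_pos (by norm_num : (0:Int) < 128)]
  rw [hG]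
  have hinner : ∀ layer : Int,
      (PySem.List.pyRange 0 128 1).flatMap (fun row =>
        (PySem.List.pyRange 0 128 1).map
          (fun col => (layer * 16384 + row * 128 + col, [(layer, row, col)])))
      = (PySem.List.pyRange 0 16384 1).map (fun j =>
          (fun i : Int => (i, [(i / 16384, (i / 128) % 128, i % 128)])) (layer * 16384 + j)) := by
    intro layer
    have hrows : ∀ row ∈ PySem.List.pyRange 0 128 1,
        (PySem.List.pyRange 0 128 1).map
          (fun col => (layer * 16384 + row * 128 + col, [(layer, row, col)]))
        = (PySem.List.pyRange 0 128 1).map (fun col =>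
            (fun i : Int => (i, [(i / 16384, (i / 128) % 128, i % 128)])) (layer * 16384 + (row * 128 + col))) := by
      intro row hrm
      rw [PySem.List.mem_pyRange_one] at hrm
      apply List.map_congr_left
      intro col hcm
      rw [PySem.List.mem_pyRange_one] at hcm
      have e2 : (layer * 16384 + (row * 128 + col)) / 16384 = layer := by omega
      have e3 : ((layer * 16384 + (row * 128 + col)) / 128) % 128 = row := by omega
      have e4 : (layer * 16384 + (row * 128 + col)) % 128 = col := by omega
      dsimp only
      rw [e2, e3, e4]
      have e1 : layer * 16384 + row * 128 + col = layer * 16384 + (row * 128 + col) := by ring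
      rw [e1]
    rw [List.flatMap_def, List.map_congr_left hrows, ← List.flatMap_def]
    have := pv_block (α := Int × List (Int × Int × Int)) 128 (by norm_num)
      (fun i : Int => (fun i : Int => (i, [(i / 16384, (i / 128) % 128, i % 128)])) (layer * 16384 + i))
      128 128 (by norm_num)
    simpa using this
  rw [List.flatMap_def, List.map_congr_left (fun layer _ => hinner layer), ← List.flatMap_def]
  have := pv_block (α := Int × List (Int × Int × Int)) 16384 (by norm_num)
    (fun i : Int => (i, [(i / 16384, (i / 128) % 128, i % 128)]))
    layers.toNat layers (by omega)
  simpa using this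

-- ===== VERDICT (by name: the statement is the Claim_ definition above) =====
theorem generate_layer_blocks_spec : Claim_equal_generate_layer_blocks := by
  intro layers _
  unfold Spec_generate_layer_blocks
  rw [pv_alt]
  unfold generate_layer_blocks
  by_cases hneg : layers ≤ 0
  · rw [PySem.List.pyRange_one_eq_nil hneg,
      PySem.List.pyRange_one_eq_nil (by nlinarith : layers * 16384 ≤ 0)]
    simp
    rfl
  · rw [not_le] at hneg
    have hA := pv_layer layers layers.toNat 0 (by omega) PySem.Dict.empty
      (by
        intro p hp
        rw [show (PySem.Dict.empty : PySem.Dict Int (List (Int × Int × Int))).items = [] from rfl] at hp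
        simp at hp)
    rw [hA]
    rw [show (PySem.Dict.empty : PySem.Dict Int (List (Int × Int × Int))).items = [] from rfl,
      List.nil_append]
    exact pv_main layers (by omega)
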